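-- pv_equiv track=rewrite | github.com/dgw0620/Online-Judge | 프로그래머스/lv0/120956. 옹알이 （1）/옹알이 （1）.py | solution
-- ===== SOURCE A (Python) =====
-- def solution(babbling):
--     answer = 0
--     bl = ["aya", "ye", "woo", "ma"]
--     for b in babbling:
--         check = 0
--         if bl[0] in b:
--             b = b.replace(bl[0], "_")
--         if bl[1] in b:
--             b = b.replace(bl[1], "_")
--         if bl[2] in b:
--             b = b.replace(bl[2], "_")
--         if bl[3] in b:
--             b = b.replace(bl[3], "_")
--         for i in b:
--             if i != "_":
--                 check = 1
--         if check == 0: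
--             answer += 1
--     return answer
-- ===== SOURCE B (Python) =====
-- def _ok(word):
--     # single left-to-right scan: consume one allowed token (or a '_' filler
--     # character, which A's replaces leave behind / pass through) at each step
--     i, n = 0, len(word)
--     while i < n:
--         if word.startswith("aya", i):
--             i += 3
--         elif word.startswith("ye", i):
--             i += 2
--         elif word.startswith("woo", i):
--             i += 3
--         elif word[i] == "_":
--             i += 1
--         elif word.startswith("ma", i):
--             i += 2
--         else:
--             return False
--     return True
--
--
-- def solution(babbling):
--     return sum(1 for word in babbling if _ok(word))
-- ===== Notes on version B (the rewrite author's own statement) =====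
-- stated objective: alternative
-- what changed: Replaces A's four sequential str.replace passes plus a residue scan by a single greedy left-to-right token scan per word (the four tokens start with distinct letters, so greedy matching is deterministic and exact); '_' is accepted as filler exactly as A's replace-with-'_' treats it.
import Mathlib
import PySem

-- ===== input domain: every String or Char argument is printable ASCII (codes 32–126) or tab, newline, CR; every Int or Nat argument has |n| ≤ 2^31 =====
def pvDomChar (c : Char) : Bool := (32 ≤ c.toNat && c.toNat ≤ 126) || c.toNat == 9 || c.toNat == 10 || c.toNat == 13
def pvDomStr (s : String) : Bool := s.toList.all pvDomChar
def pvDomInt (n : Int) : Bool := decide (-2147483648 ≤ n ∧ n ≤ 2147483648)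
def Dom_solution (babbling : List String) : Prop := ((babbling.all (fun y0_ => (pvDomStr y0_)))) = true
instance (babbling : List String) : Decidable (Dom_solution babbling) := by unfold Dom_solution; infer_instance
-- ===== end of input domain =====

-- ===== PORT A =====
-- one honest line: B validates each word by a single greedy left-to-right token scan
-- instead of A's four guarded str.replace passes plus a residue scan; same results.
-- (bl[0]..bl[3] are literal indexings into the literal list bl, ported directly)
def solution (babbling : List String) : Int :=
  babbling.foldl (fun answer b =>
    let bl : List String := ["aya", "ye", "woo", "ma"]
    let b1 := if PySem.Str.isIn bl[0] b then PySem.Str.replace b bl[0] "_" else b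
    let b2 := if PySem.Str.isIn bl[1] b1 then PySem.Str.replace b1 bl[1] "_" else b1
    let b3 := if PySem.Str.isIn bl[2] b2 then PySem.Str.replace b2 bl[2] "_" else b2
    let b4 := if PySem.Str.isIn bl[3] b3 then PySem.Str.replace b3 bl[3] "_" else b3
    let check : Int := b4.toList.foldl (fun check i => if i ≠ '_' then 1 else check) 0
    if check = 0 then answer + 1 else answer) 0

-- ===== PORT B =====
-- greedy scan of Source B's _ok: at each position consume "aya"/"ye"/"woo"/'_'/"ma" (same order)
def okChars : List Char → Bool
  | [] => true
  | 'a' :: 'y' :: 'a' :: t => okChars t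
  | 'y' :: 'e' :: t => okChars t
  | 'w' :: 'o' :: 'o' :: t => okChars t
  | '_' :: t => okChars t
  | 'm' :: 'a' :: t => okChars t
  | _ => false

def solution_alt (babbling : List String) : Int :=
  (babbling.countP (fun w => okChars w.toList) : Int)

-- ===== PRECONDITION & SPEC =====
def Spec_solution (babbling : List String) (out : Int) : Prop := out = solution_alt babbling
instance (babbling : List String) (out : Int) : Decidable (Spec_solution babbling out) := by unfold Spec_solution; infer_instance

-- ===== CLAIM (what is proved, stated in full; the proofs are below) =====
def Claim_equal_solution : Prop := ∀ (babbling : List String), Dom_solution babbling → Spec_solution babbling (solution babbling)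

-- ===== LEMMAS AND PROOFS =====
-- myRep is a fuel-free restatement of PySem.Chars.replace (old, "_") used for the induction
def myRep (pat : List Char) : List Char → List Char
  | [] => []
  | c :: t => if pat.isPrefixOf (c :: t) then '_' :: myRep pat (t.drop (pat.length - 1))
              else c :: myRep pat t
termination_by l => l.length
decreasing_by
  all_goals (simp [List.length_drop]; try omega)

lemma go_eq (p : Char) (ps : List Char) : ∀ (fuel : Nat) (l acc : List Char), l.length ≤ fuel →
    PySem.Chars.replace.go (p :: ps) ['_'] fuel l acc = acc.reverse ++ myRep (p :: ps) l := by
  intro fuel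
  induction fuel with
  | zero => intro l acc h
            have : l = [] := List.eq_nil_of_length_eq_zero (Nat.le_zero.mp h)
            subst this; simp [PySem.Chars.replace.go, myRep]
  | succ n ih =>
      intro l acc h
      cases l with
      | nil => simp [PySem.Chars.replace.go, myRep]
      | cons c t =>
        rw [PySem.Chars.replace.go]
        by_cases hp : (p :: ps).isPrefixOf (c :: t) = true
        · rw [if_pos hp, ih _ _ (by simp [List.length_drop] at *; omega), myRep, if_pos hp]
          simp
        · rw [if_neg hp, ih _ _ (by simp at h; omega), myRep, if_neg hp]
          simp

lemma replace_eq (p : Char) (ps l : List Char) :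
    PySem.Chars.replace l (p :: ps) ['_'] = myRep (p :: ps) l := by
  rw [PySem.Chars.replace]
  simp [go_eq p ps l.length l [] (le_refl _)]

lemma myRep_id (p : Char) (ps : List Char) : ∀ l, ¬ (p :: ps) <:+: l → myRep (p :: ps) l = l := by
  intro l
  induction l with
  | nil => intro _; rw [myRep]
  | cons c t ih =>
    intro h
    rw [myRep, if_neg, ih (fun hi => h (List.infix_cons hi))]
    intro hp
    exact h (List.IsPrefix.isInfix (List.isPrefixOf_iff_prefix.mp hp))

lemma checkFold (l : List Char) (k : Int) :
    l.foldl (fun check i => if i ≠ '_' then 1 else check) k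
      = if l.all (· == '_') then k else 1 := by
  induction l generalizing k with
  | nil => simp
  | cons c t ih =>
    rw [List.foldl_cons]
    by_cases hc : c = '_'
    · subst hc; rw [if_neg (by simp), ih]; simp
    · rw [if_pos hc, ih]; simp [hc]

lemma noPref (p : Char) (ps : List Char) (c : Char) (t : List Char)
    (h : ¬ ((p :: ps).isPrefixOf (c :: t) = true)) :
    myRep (p :: ps) (c :: t) = c :: myRep (p :: ps) t := by
  rw [myRep, if_neg h]

lemma skip (p : Char) (ps : List Char) (c : Char) (t : List Char) (h : p ≠ c) :
    myRep (p :: ps) (c :: t) = c :: myRep (p :: ps) t := by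
  refine noPref p ps c t ?_
  simp [List.isPrefixOf]
  exact fun hpc => absurd hpc h

lemma myRep_cons_inv (p : Char) (ps l : List Char) (c : Char) (x : List Char)
    (h : myRep (p :: ps) l = c :: x) (hc : c ≠ '_') :
    ∃ t, l = c :: t ∧ x = myRep (p :: ps) t := by
  cases l with
  | nil => rw [myRep] at h; simp at h
  | cons a t =>
    rw [myRep] at h
    by_cases hp : (p :: ps).isPrefixOf (a :: t) = true
    · rw [if_pos hp] at h; exact absurd (List.cons.injEq .. ▸ h).1.symm hc
    · rw [if_neg hp] at h
      obtain ⟨h1, h2⟩ := List.cons.inj h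
      exact ⟨t, by rw [h1], h2.symm⟩

def chain (l : List Char) : List Char :=
  myRep ['m','a'] (myRep ['w','o','o'] (myRep ['y','e'] (myRep ['a','y','a'] l)))

lemma L_aya (t : List Char) : myRep ['a','y','a'] ('a'::'y'::'a'::t) = '_' :: myRep ['a','y','a'] t := by
  rw [myRep, if_pos (by simp [List.isPrefixOf])]; rfl

lemma L_ye (t : List Char) : myRep ['y','e'] ('y'::'e'::t) = '_' :: myRep ['y','e'] t := by
  rw [myRep, if_pos (by simp [List.isPrefixOf])]; rfl

lemma L_woo (t : List Char) : myRep ['w','o','o'] ('w'::'o'::'o'::t) = '_' :: myRep ['w','o','o'] t := by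
  rw [myRep, if_pos (by simp [List.isPrefixOf])]; rfl

lemma L_ma (t : List Char) : myRep ['m','a'] ('m'::'a'::t) = '_' :: myRep ['m','a'] t := by
  rw [myRep, if_pos (by simp [List.isPrefixOf])]; rfl

lemma C_nil : chain [] = [] := by simp [chain, myRep]

lemma C_us (t : List Char) : chain ('_'::t) = '_' :: chain t := by
  rw [chain, skip 'a' ['y','a'] '_' t (by decide),
      skip 'y' ['e'] '_' _ (by decide),
      skip 'w' ['o','o'] '_' _ (by decide),
      skip 'm' ['a'] '_' _ (by decide)]
  rfl

lemma C_aya (t : List Char) : chain ('a'::'y'::'a'::t) = '_' :: chain t := by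
  rw [chain, L_aya t, skip 'y' ['e'] '_' _ (by decide),
      skip 'w' ['o','o'] '_' _ (by decide), skip 'm' ['a'] '_' _ (by decide)]
  rfl

lemma C_ye (t : List Char) : chain ('y'::'e'::t) = '_' :: chain t := by
  rw [chain, skip 'a' ['y','a'] 'y' ('e'::t) (by decide),
      skip 'a' ['y','a'] 'e' t (by decide),
      L_ye (myRep ['a','y','a'] t),
      skip 'w' ['o','o'] '_' _ (by decide), skip 'm' ['a'] '_' _ (by decide)]
  rfl

lemma C_woo (t : List Char) : chain ('w'::'o'::'o'::t) = '_' :: chain t := by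
  rw [chain, skip 'a' ['y','a'] 'w' ('o'::'o'::t) (by decide),
      skip 'a' ['y','a'] 'o' ('o'::t) (by decide),
      skip 'a' ['y','a'] 'o' t (by decide),
      skip 'y' ['e'] 'w' ('o'::'o'::myRep ['a','y','a'] t) (by decide),
      skip 'y' ['e'] 'o' ('o'::myRep ['a','y','a'] t) (by decide),
      skip 'y' ['e'] 'o' (myRep ['a','y','a'] t) (by decide),
      L_woo (myRep ['y','e'] (myRep ['a','y','a'] t)),
      skip 'm' ['a'] '_' _ (by decide)]
  rfl

lemma C_ma (t : List Char) (h : ¬ (['a','y','a'].isPrefixOf ('a'::t) = true)) :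
    chain ('m'::'a'::t) = '_' :: chain t := by
  rw [chain, skip 'a' ['y','a'] 'm' ('a'::t) (by decide),
      noPref 'a' ['y','a'] 'a' t h,
      skip 'y' ['e'] 'm' ('a'::myRep ['a','y','a'] t) (by decide),
      skip 'y' ['e'] 'a' (myRep ['a','y','a'] t) (by decide),
      skip 'w' ['o','o'] 'm' ('a'::myRep ['y','e'] (myRep ['a','y','a'] t)) (by decide),
      skip 'w' ['o','o'] 'a' (myRep ['y','e'] (myRep ['a','y','a'] t)) (by decide),
      L_ma (myRep ['w','o','o'] (myRep ['y','e'] (myRep ['a','y','a'] t)))]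
  rfl

lemma C_maya (u : List Char) : chain ('m'::'a'::'y'::'a'::u) = 'm'::'_':: chain u := by
  rw [chain, skip 'a' ['y','a'] 'm' ('a'::'y'::'a'::u) (by decide),
      L_aya u,
      skip 'y' ['e'] 'm' ('_'::myRep ['a','y','a'] u) (by decide),
      skip 'y' ['e'] '_' (myRep ['a','y','a'] u) (by decide),
      skip 'w' ['o','o'] 'm' ('_'::myRep ['y','e'] (myRep ['a','y','a'] u)) (by decide),
      skip 'w' ['o','o'] '_' (myRep ['y','e'] (myRep ['a','y','a'] u)) (by decide),
      noPref 'm' ['a'] 'm' ('_'::myRep ['w','o','o'] (myRep ['y','e'] (myRep ['a','y','a'] u))) (by simp [List.isPrefixOf]),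
      skip 'm' ['a'] '_' (myRep ['w','o','o'] (myRep ['y','e'] (myRep ['a','y','a'] u))) (by decide)]
  rfl

lemma C_a (t : List Char) (h : ¬ (['a','y','a'].isPrefixOf ('a'::t) = true)) :
    chain ('a'::t) = 'a' :: chain t := by
  rw [chain, noPref 'a' ['y','a'] 'a' t h,
      skip 'y' ['e'] 'a' (myRep ['a','y','a'] t) (by decide),
      skip 'w' ['o','o'] 'a' (myRep ['y','e'] (myRep ['a','y','a'] t)) (by decide),
      skip 'm' ['a'] 'a' (myRep ['w','o','o'] (myRep ['y','e'] (myRep ['a','y','a'] t))) (by decide)]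
  rfl

lemma C_y (t : List Char) (h : ∀ u, t ≠ 'e'::u) : chain ('y'::t) = 'y' :: chain t := by
  rw [chain, skip 'a' ['y','a'] 'y' t (by decide),
      noPref 'y' ['e'] 'y' (myRep ['a','y','a'] t) ?hy,
      skip 'w' ['o','o'] 'y' (myRep ['y','e'] (myRep ['a','y','a'] t)) (by decide),
      skip 'm' ['a'] 'y' (myRep ['w','o','o'] (myRep ['y','e'] (myRep ['a','y','a'] t))) (by decide)]
  · rfl
  case hy =>
    intro hp
    obtain ⟨u, hu⟩ := List.isPrefixOf_iff_prefix.mp hp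
    have hX : myRep ['a','y','a'] t = 'e' :: u := by
      have := List.cons.inj hu.symm; simpa using this.2
    obtain ⟨t1, ht1, _⟩ := myRep_cons_inv 'a' ['y','a'] t 'e' u hX (by decide)
    exact h t1 ht1

lemma C_w (t : List Char) (h : ∀ u, t ≠ 'o'::'o'::u) : chain ('w'::t) = 'w' :: chain t := by
  rw [chain, skip 'a' ['y','a'] 'w' t (by decide),
      skip 'y' ['e'] 'w' (myRep ['a','y','a'] t) (by decide),
      noPref 'w' ['o','o'] 'w' (myRep ['y','e'] (myRep ['a','y','a'] t)) ?hw,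
      skip 'm' ['a'] 'w' (myRep ['w','o','o'] (myRep ['y','e'] (myRep ['a','y','a'] t))) (by decide)]
  · rfl
  case hw =>
    intro hp
    obtain ⟨u, hu⟩ := List.isPrefixOf_iff_prefix.mp hp
    have hX : myRep ['y','e'] (myRep ['a','y','a'] t) = 'o'::'o'::u := by
      have := List.cons.inj hu.symm; simpa using this.2
    obtain ⟨t1, ht1, hx1⟩ := myRep_cons_inv 'y' ['e'] _ 'o' ('o'::u) hX (by decide)
    obtain ⟨t2, ht2, _⟩ := myRep_cons_inv 'y' ['e'] t1 'o' u hx1.symm (by decide)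
    obtain ⟨t3, ht3, hx3⟩ := myRep_cons_inv 'a' ['y','a'] t 'o' t1 ht1 (by decide)
    obtain ⟨t4, ht4, _⟩ := myRep_cons_inv 'a' ['y','a'] t3 'o' t2 (hx3 ▸ ht2) (by decide)
    exact h t4 (by rw [ht3, ht4])

lemma C_m (t : List Char) (h : ∀ u, t ≠ 'a'::u) : chain ('m'::t) = 'm' :: chain t := by
  rw [chain, skip 'a' ['y','a'] 'm' t (by decide),
      skip 'y' ['e'] 'm' (myRep ['a','y','a'] t) (by decide),
      skip 'w' ['o','o'] 'm' (myRep ['y','e'] (myRep ['a','y','a'] t)) (by decide),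
      noPref 'm' ['a'] 'm' (myRep ['w','o','o'] (myRep ['y','e'] (myRep ['a','y','a'] t))) ?hm]
  · rfl
  case hm =>
    intro hp
    obtain ⟨u, hu⟩ := List.isPrefixOf_iff_prefix.mp hp
    have hX : myRep ['w','o','o'] (myRep ['y','e'] (myRep ['a','y','a'] t)) = 'a' :: u := by
      have := List.cons.inj hu.symm; simpa using this.2
    obtain ⟨t1, ht1, _⟩ := myRep_cons_inv 'w' ['o','o'] _ 'a' u hX (by decide)
    obtain ⟨t2, ht2, _⟩ := myRep_cons_inv 'y' ['e'] _ 'a' t1 ht1 (by decide)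
    obtain ⟨t3, ht3, _⟩ := myRep_cons_inv 'a' ['y','a'] t 'a' t2 ht2 (by decide)
    exact h t3 ht3

lemma C_other (c : Char) (t : List Char) (h1 : c ≠ 'a') (h2 : c ≠ 'y') (h3 : c ≠ 'w') (h4 : c ≠ 'm') :
    chain (c::t) = c :: chain t := by
  rw [chain, skip 'a' ['y','a'] c t (Ne.symm h1),
      skip 'y' ['e'] c (myRep ['a','y','a'] t) (Ne.symm h2),
      skip 'w' ['o','o'] c (myRep ['y','e'] (myRep ['a','y','a'] t)) (Ne.symm h3),
      skip 'm' ['a'] c (myRep ['w','o','o'] (myRep ['y','e'] (myRep ['a','y','a'] t))) (Ne.symm h4)]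
  rfl

lemma main_eq (l : List Char) : ((chain l).all (· == '_')) = okChars l := by
  induction l using okChars.induct with
  | case1 => rw [C_nil]; rfl
  | case2 t ih => rw [C_aya]; simpa [okChars] using ih
  | case3 t ih => rw [C_ye]; simpa [okChars] using ih
  | case4 t ih => rw [C_woo]; simpa [okChars] using ih
  | case5 t ih => rw [C_us]; simpa [okChars] using ih
  | case6 t ih =>
    by_cases hy : ['a','y','a'].isPrefixOf ('a'::t) = true
    · obtain ⟨u, hu⟩ := List.isPrefixOf_iff_prefix.mp hy
      have ht : t = 'y'::'a'::u := by
        have := List.cons.inj hu.symm; simpa using this.2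
      subst ht
      rw [C_maya]
      simp [okChars]
    · rw [C_ma t hy]; simpa [okChars] using ih
  | case7 t hnil h2 h3 h4 h5 h6 =>
    cases t with
    | nil => exact (hnil rfl).elim
    | cons c r =>
      have hok : okChars (c :: r) = false := by
        rw [okChars.eq_def]
        split <;> first | rfl | simp_all
      rw [hok]
      by_cases hc : c = '_'
      · exact (h5 r (by rw [hc])).elim
      by_cases ha : c = 'a'
      · subst ha
        have hpa : ¬ (['a','y','a'].isPrefixOf ('a'::r) = true) := by
          intro hp
          obtain ⟨u, hu⟩ := List.isPrefixOf_iff_prefix.mp hp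
          exact h2 u (by have := List.cons.inj hu.symm; simpa using this.2)
        rw [C_a r hpa]; simp
      by_cases hyy : c = 'y'
      · subst hyy
        have : ∀ u, r ≠ 'e'::u := fun u hr => h3 u (by rw [hr])
        rw [C_y r this]; simp
      by_cases hw : c = 'w'
      · subst hw
        have : ∀ u, r ≠ 'o'::'o'::u := fun u hr => h4 u (by rw [hr])
        rw [C_w r this]; simp
      by_cases hm : c = 'm'
      · subst hm
        have : ∀ u, r ≠ 'a'::u := fun u hr => h6 u (by rw [hr])
        rw [C_m r this]; simp
      · rw [C_other c r ha hyy hw hm]; simp [hc]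

def stepS (pat b : String) : String :=
  if PySem.Str.isIn pat b then PySem.Str.replace b pat "_" else b

lemma step_toList (pat b : String) (p : Char) (ps : List Char) (hp : pat.toList = p :: ps) :
    (stepS pat b).toList = myRep (p :: ps) b.toList := by
  rw [stepS]
  by_cases h : PySem.Str.isIn pat b = true
  · rw [if_pos h, PySem.Str.toList_replace, hp,
        show ("_" : String).toList = ['_'] from rfl, replace_eq]
  · rw [if_neg h]
    have hni : ¬ (p :: ps) <:+: b.toList := by
      rw [← hp]
      intro hinf
      exact h ((PySem.Str.isIn_iff_infix pat b).mpr hinf)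
    exact (myRep_id p ps b.toList hni).symm

lemma chain4 (b : String) :
    (stepS "ma" (stepS "woo" (stepS "ye" (stepS "aya" b)))).toList = chain b.toList := by
  rw [step_toList "ma" _ 'm' ['a'] rfl, step_toList "woo" _ 'w' ['o','o'] rfl,
      step_toList "ye" _ 'y' ['e'] rfl, step_toList "aya" _ 'a' ['y','a'] rfl]
  rfl


-- ===== VERDICT (by name: the statement is the Claim_ definition above) =====
theorem solution_spec : Claim_equal_solution := by
  intro bab _
  unfold Spec_solution solution solution_alt
  show List.foldl (fun (answer : Int) (b : String) =>
      if ((stepS "ma" (stepS "woo" (stepS "ye" (stepS "aya" b)))).toList.foldl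
            (fun check i => if i ≠ '_' then (1:Int) else check) 0) = 0
      then answer + 1 else answer) 0 bab = _
  have hlam : (fun (answer : Int) (b : String) =>
      if ((stepS "ma" (stepS "woo" (stepS "ye" (stepS "aya" b)))).toList.foldl
            (fun check i => if i ≠ '_' then (1:Int) else check) 0) = 0
      then answer + 1 else answer)
      = fun (answer : Int) (b : String) =>
          if (fun w : String => okChars w.toList) b = true then answer + 1 else answer := by
    funext answer b
    rw [chain4, checkFold]
    have hm := main_eq b.toList
    cases hall : (chain b.toList).all (fun x => x == '_') <;>
      rw [hall] at hm <;> simp [← hm]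
  rw [hlam, PySem.List.foldl_count_if]
  simp
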